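-- pv_equiv track=rewrite | github.com/quantumquantara-arch/aureon-anatomy | aureon_surgeon.py | _block_end
-- ===== SOURCE A (Python) =====
-- from typing import Any, Dict, List, Optional
--
-- def _block_end(lines: List[str], start_idx: int, base_indent: int = None) -> int:
--     if base_indent is None:
--         line = lines[start_idx]
--         base_indent = len(line) - len(line.lstrip())
--     end = start_idx
--     for i in range(start_idx + 1, len(lines)):
--         line = lines[i]
--         if not line.strip():
--             continue
--         indent = len(line) - len(line.lstrip())
--         if indent <= base_indent and line.strip():
--             break
--         end = i
--     return end + 1
-- ===== SOURCE B (Python) =====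
-- from typing import List
--
-- def _block_end(lines: List[str], start_idx: int, base_indent: int = None) -> int:
--     if base_indent is None:
--         line = lines[start_idx]
--         base_indent = len(line) - len(line.lstrip())
--     term = next((i for i in range(start_idx + 1, len(lines))
--                  if lines[i].strip()
--                  and len(lines[i]) - len(lines[i].lstrip()) <= base_indent),
--                 len(lines))
--     return next((i + 1 for i in range(term - 1, start_idx, -1) if lines[i].strip()),
--                 start_idx + 1)
-- ===== Notes on version B (the rewrite author's own statement) =====
-- stated objective: alternative
-- what changed: Replaces A's single forward scan that drags a last-kept-index accumulator and a break through every line with two independent passes: a forward search for the first terminator line (non-blank, indent <= base), then a backward search from it for the last non-blank line of the block.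
import Mathlib
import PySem

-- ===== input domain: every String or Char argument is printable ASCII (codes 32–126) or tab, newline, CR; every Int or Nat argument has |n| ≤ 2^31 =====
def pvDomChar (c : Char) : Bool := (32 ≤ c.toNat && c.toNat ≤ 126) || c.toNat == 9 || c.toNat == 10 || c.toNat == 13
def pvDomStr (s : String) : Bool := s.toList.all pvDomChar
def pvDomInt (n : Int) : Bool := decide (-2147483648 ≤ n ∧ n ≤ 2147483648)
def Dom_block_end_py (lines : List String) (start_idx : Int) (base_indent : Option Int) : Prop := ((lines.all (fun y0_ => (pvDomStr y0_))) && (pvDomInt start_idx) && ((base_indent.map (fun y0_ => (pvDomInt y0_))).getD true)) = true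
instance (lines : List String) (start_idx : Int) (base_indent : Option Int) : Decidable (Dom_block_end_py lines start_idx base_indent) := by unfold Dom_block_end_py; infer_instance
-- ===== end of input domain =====

-- B replaces A's one forward scan with accumulator+break by two passes: find the
-- terminator index forward, then the last non-blank block line backward from it.

-- ===== PORT A =====
-- indent of a line: len(line) - len(line.lstrip())  (used verbatim by both Pythons)
def pvIndent (line : String) : Int :=
  PySem.Str.len line - PySem.Str.len (PySem.Str.lstrip line)

def block_end_py (lines : List String) (start_idx : Int) (base_indent : Option Int) : Int :=
  let bi : Int := match base_indent with
    | some b => b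
    | none => pvIndent (PySem.List.pyGetD lines start_idx "")
  let st : Int × Bool :=
    (PySem.List.pyRange (start_idx + 1) (lines.length : Int) 1).foldl
      (fun (st : Int × Bool) i =>
        if st.2 then st                       -- already broke out of the loop
        else
          let line := PySem.List.pyGetD lines i ""
          if PySem.Str.strip line == "" then st   -- blank: continue
          else if pvIndent line ≤ bi then (st.1, true)  -- break
          else (i, st.2))                     -- end = i
      (start_idx, false)
  st.1 + 1

-- ===== PORT B =====
def block_end_py_alt (lines : List String) (start_idx : Int) (base_indent : Option Int) : Int :=
  let bi : Int := match base_indent with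
    | some b => b
    | none => pvIndent (PySem.List.pyGetD lines start_idx "")
  let nonblank : Int → Bool := fun i =>
    !(PySem.Str.strip (PySem.List.pyGetD lines i "") == "")
  -- forward pass: first non-blank line at indent ≤ bi, default len(lines)
  let term : Int :=
    ((PySem.List.pyRange (start_idx + 1) (lines.length : Int) 1).find?
        (fun i => nonblank i && decide (pvIndent (PySem.List.pyGetD lines i "") ≤ bi))).getD
      (lines.length : Int)
  -- backward pass: last non-blank line strictly between start_idx and term
  (((PySem.List.pyRange (term - 1) start_idx (-1)).find? nonblank).map (· + 1)).getD
    (start_idx + 1)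

-- ===== PRECONDITION & SPEC =====
-- Pre_ excludes exactly the inputs on which the Python A raises IndexError:
-- lines[start_idx] out of range when base_indent is None, and a loop start
-- start_idx+1 below -len(lines) (Python's negative indexing then raises).
def Pre_block_end_py (lines : List String) (start_idx : Int) (base_indent : Option Int) : Prop :=
  (-(lines.length : Int) ≤ start_idx + 1) ∧
  (base_indent = none → PySem.Raise.InRange lines.length start_idx)
instance (lines : List String) (start_idx : Int) (base_indent : Option Int) : Decidable (Pre_block_end_py lines start_idx base_indent) := by unfold Pre_block_end_py; infer_instance

def pvWitness_block_end_py : List String × Int × Option Int := (["def f():", "  x = 1", "", "  y = 2", "z"], 0, none)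

def Spec_block_end_py (lines : List String) (start_idx : Int) (base_indent : Option Int) (out : Int) : Prop := out = block_end_py_alt lines start_idx base_indent
instance (lines : List String) (start_idx : Int) (base_indent : Option Int) (out : Int) : Decidable (Spec_block_end_py lines start_idx base_indent out) := by unfold Spec_block_end_py; infer_instance

-- ===== CLAIM (what is proved, stated in full; the proofs are below) =====
def Claim_equal_block_end_py : Prop := ∀ (lines : List String) (start_idx : Int) (base_indent : Option Int), Dom_block_end_py lines start_idx base_indent → Pre_block_end_py lines start_idx base_indent → Spec_block_end_py lines start_idx base_indent (block_end_py lines start_idx base_indent)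

-- ===== LEMMAS AND PROOFS =====

-- A's loop state freezes once the break flag is set.
theorem pvFoldFrozen (f : Int × Bool → Int → Int × Bool)
    (hf : ∀ st i, st.2 = true → f st i = st)
    (M : List Int) (e : Int) : M.foldl f (e, true) = (e, true) := by
  induction M with
  | nil => rfl
  | cons m M ih => simp [List.foldl, hf (e, true) m rfl, ih]

-- Core invariant: over a stretch with no terminator line, A's accumulator ends as
-- the last non-blank index of the stretch (default e0), and the flag stays false.
theorem pvFoldCore (nb : Int → Bool) (stop : Int → Bool) (e0 : Int)
    (M : List Int) (h : ∀ x ∈ M, (nb x && stop x) = false) :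
    M.foldl
      (fun (st : Int × Bool) i =>
        if st.2 then st
        else if !(nb i) then st
        else if stop i then (st.1, true)
        else (i, st.2))
      (e0, false)
    = ((M.reverse.find? nb).getD e0, false) := by
  induction M generalizing e0 with
  | nil => rfl
  | cons m M ih =>
      have hm := h m (List.mem_cons_self ..)
      have hM : ∀ x ∈ M, (nb x && stop x) = false := fun x hx => h x (List.mem_cons_of_mem _ hx)
      have hstep : (if (false : Bool) = true then (e0, false)
          else if (!nb m) = true then (e0, false)
          else if stop m = true then (e0, true) else (m, false))
          = ((if nb m = true then m else e0), false) := by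
        by_cases hb : nb m = true
        · have hs : stop m = false := by
            cases hstop : stop m
            · rfl
            · rw [hb, hstop] at hm; simp at hm
          simp [hb, hs]
        · simp [hb]
      simp only [List.foldl_cons, hstep]
      rw [ih _ hM]
      simp only [List.reverse_cons, List.find?_append]
      by_cases hb : nb m = true <;>
        cases hf : M.reverse.find? nb <;> simp [List.find?, hb]

-- find? on a consecutive range splits it at the hit.
theorem pvFindRangeSplitAux (p : Int → Bool) :
    ∀ (k : Nat) (a n t : Int), (t - a).toNat = k →
      (PySem.List.pyRange a n 1).find? p = some t →
      ∀ x ∈ PySem.List.pyRange a t 1, p x = false := by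
  intro k
  induction k with
  | zero =>
      intro a n t hk h x hx
      rw [PySem.List.pyRange_one_eq_nil (by omega)] at hx
      simp at hx
  | succ k ih =>
      intro a n t hk h x hx
      have han : a < n := by
        by_contra hc
        rw [PySem.List.pyRange_one_eq_nil (by omega)] at h
        simp at h
      have hlt : a < t := by omega
      rw [PySem.List.pyRange_one_cons hlt] at hx
      rw [PySem.List.pyRange_one_cons han] at h
      rcases List.mem_cons.mp hx with rfl | hx'
      · cases hpa : p x
        · rfl
        · rw [List.find?_cons_of_pos hpa] at h
          have : x = t := by injection h
          omega
      · cases hpa : p a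
        · rw [List.find?_cons_of_neg (by simp [hpa])] at h
          exact ih (a + 1) n t (by omega) h x hx'
        · rw [List.find?_cons_of_pos hpa] at h
          have : a = t := by injection h
          omega

theorem pvFindRangeSplit (p : Int → Bool) (a n t : Int)
    (h : (PySem.List.pyRange a n 1).find? p = some t) :
    a ≤ t ∧ t < n ∧ p t = true ∧ ∀ x ∈ PySem.List.pyRange a t 1, p x = false := by
  have hmem : t ∈ PySem.List.pyRange a n 1 := List.mem_of_find?_eq_some h
  rw [PySem.List.mem_pyRange_one] at hmem
  exact ⟨hmem.1, hmem.2, List.find?_some h, pvFindRangeSplitAux p (t - a).toNat a n t rfl h⟩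

-- The two passes of B compute A's single pass, for any base indent bi.
theorem pvMain (lines : List String) (start_idx bi : Int) :
    (List.foldl
        (fun (st : Int × Bool) i =>
          if st.2 then st
          else
            let line := PySem.List.pyGetD lines i ""
            if PySem.Str.strip line == "" then st
            else if pvIndent line ≤ bi then (st.1, true)
            else (i, st.2))
        (start_idx, false)
        (PySem.List.pyRange (start_idx + 1) (lines.length : Int) 1)).1 + 1
    =
    (((PySem.List.pyRange
          ((((PySem.List.pyRange (start_idx + 1) (lines.length : Int) 1).find?
              (fun i => (!(PySem.Str.strip (PySem.List.pyGetD lines i "") == "")) && decide (pvIndent (PySem.List.pyGetD lines i "") ≤ bi))).getD (lines.length : Int)) - 1)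
          start_idx (-1)).find? (fun i => !(PySem.Str.strip (PySem.List.pyGetD lines i "") == ""))).map (· + 1)).getD (start_idx + 1) := by
  set nb : Int → Bool := fun i => !(PySem.Str.strip (PySem.List.pyGetD lines i "") == "") with hnb
  set stop : Int → Bool := fun i => decide (pvIndent (PySem.List.pyGetD lines i "") ≤ bi) with hstop
  set n : Int := (lines.length : Int) with hn
  set a : Int := start_idx + 1 with ha
  have hfold :
      List.foldl
        (fun (st : Int × Bool) i =>
          if st.2 then st
          else
            let line := PySem.List.pyGetD lines i ""
            if PySem.Str.strip line == "" then st
            else if pvIndent line ≤ bi then (st.1, true)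
            else (i, st.2))
        (start_idx, false) (PySem.List.pyRange a n 1)
      = List.foldl
        (fun (st : Int × Bool) i =>
          if st.2 then st
          else if !(nb i) then st
          else if stop i then (st.1, true)
          else (i, st.2))
        (start_idx, false) (PySem.List.pyRange a n 1) := by
    apply PySem.List.foldl_congr_mem
    intro st i _
    by_cases h2 : st.2 <;> by_cases h3 : PySem.Str.strip (PySem.List.pyGetD lines i "") == "" <;>
      simp [h2, h3, hnb, hstop]
  rw [hfold]
  cases hfind : (PySem.List.pyRange a n 1).find? (fun i => nb i && stop i) with
  | none =>
      have hnostop : ∀ x ∈ PySem.List.pyRange a n 1, (nb x && stop x) = false := by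
        intro x hx
        simpa using List.find?_eq_none.mp hfind x hx
      rw [pvFoldCore nb stop start_idx _ hnostop]
      simp only [Option.getD_none]
      rw [PySem.List.pyRange_neg_one_eq_reverse]
      rw [show n - 1 + 1 = n by ring]
      cases hf : (PySem.List.pyRange a n 1).reverse.find? nb <;> simp [ha]
  | some t =>
      obtain ⟨hat, htn, hpt, hpre⟩ := pvFindRangeSplit _ a n t hfind
      rw [PySem.List.pyRange_one_append a t n hat (by omega)]
      rw [List.foldl_append]
      rw [pvFoldCore nb stop start_idx _ hpre]
      rw [PySem.List.pyRange_one_cons htn]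
      simp only [List.foldl_cons]
      have hboth : nb t = true ∧ stop t = true := by simpa using hpt
      have hnbt := hboth.1
      have hstopt := hboth.2
      rw [show (if (false : Bool) = true then (((PySem.List.pyRange a t 1).reverse.find? nb).getD start_idx, false)
            else if !(nb t) then (((PySem.List.pyRange a t 1).reverse.find? nb).getD start_idx, false)
            else if stop t then (((PySem.List.pyRange a t 1).reverse.find? nb).getD start_idx, true)
            else (t, false))
          = (((PySem.List.pyRange a t 1).reverse.find? nb).getD start_idx, true) by
        simp [hnbt, hstopt]]
      rw [pvFoldFrozen _ (fun st i h => by simp [h]) _ _]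
      simp only [Option.getD_some]
      rw [PySem.List.pyRange_neg_one_eq_reverse]
      rw [show t - 1 + 1 = t by ring]
      cases hf : (PySem.List.pyRange a t 1).reverse.find? nb <;> simp [ha]

-- ===== VERDICT (by name: the statement is the Claim_ definition above) =====
theorem block_end_py_spec : Claim_equal_block_end_py := by
  intro lines start_idx base_indent _ _
  unfold Spec_block_end_py block_end_py block_end_py_alt
  cases base_indent with
  | none => exact pvMain lines start_idx _
  | some b => exact pvMain lines start_idx b
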